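-- pv_equiv track=rewrite | github.com/tsuru7/algorithm-study | typical90/58/A.py | func
-- ===== SOURCE A (Python) =====
-- def func(x):
--     xtmp = x
--     sum = 0
--     while x > 0:
--         sum += x % 10
--         x = x // 10
--     sum += xtmp
--     return sum % 10**5
-- ===== SOURCE B (Python) =====
-- def func(x):
--     s = sum(map(int, str(x))) if x > 0 else 0
--     return (s + x) % 10**5
-- ===== Notes on version B (the rewrite author's own statement) =====
-- stated objective: idiomatic
-- what changed: B computes the digit sum by mapping int over the decimal string str(x) (guarded by x > 0) instead of A's while-loop peeling digits with % 10 and // 10, then takes (s + x) % 10**5.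
import Mathlib
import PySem

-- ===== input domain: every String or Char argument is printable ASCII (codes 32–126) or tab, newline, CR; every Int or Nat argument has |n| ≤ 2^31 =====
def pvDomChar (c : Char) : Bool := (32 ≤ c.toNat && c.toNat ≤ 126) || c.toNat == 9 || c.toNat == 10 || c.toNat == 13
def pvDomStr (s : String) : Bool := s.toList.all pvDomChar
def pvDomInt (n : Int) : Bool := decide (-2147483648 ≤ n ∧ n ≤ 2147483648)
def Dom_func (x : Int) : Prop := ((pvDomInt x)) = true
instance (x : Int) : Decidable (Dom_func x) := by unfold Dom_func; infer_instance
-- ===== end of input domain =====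

-- B replaces A's %10 / //10 digit-peeling loop by mapping int over str(x); same cost, more idiomatic.

-- ===== PORT A =====
-- while x > 0: sum += x % 10; x = x // 10  — returns (final x, final sum)
def funcLoop (x : Int) (s : Int) : Int × Int :=
  if 0 < x then funcLoop (PySem.Int.floordiv x 10) (s + PySem.Int.mod x 10) else (x, s)
termination_by x.toNat
decreasing_by
  rename_i h
  rw [PySem.Int.floordiv_eq_ediv_of_pos (by omega)]
  omega

def func (x : Int) : Int :=
  -- xtmp = x; sum = 0; while-loop; sum += xtmp; return sum % 10**5
  PySem.Int.mod ((funcLoop x 0).2 + x) (10 ^ 5)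

-- ===== PORT B =====
-- int(d) for a single character d (never a ValueError on the digit characters of str(x))
def digitInt (c : Char) : Int := (PySem.Int.ofChars? [c]).getD 0

def func_alt (x : Int) : Int :=
  let s : Int := if 0 < x then ((PySem.Int.toStr x).toList.map digitInt).sum else 0
  PySem.Int.mod (s + x) (10 ^ 5)

-- ===== PRECONDITION & SPEC =====
def Spec_func (x : Int) (out : Int) : Prop := out = func_alt x
instance (x : Int) (out : Int) : Decidable (Spec_func x out) := by unfold Spec_func; infer_instance

-- ===== CLAIM (what is proved, stated in full; the proofs are below) =====
def Claim_equal_func : Prop := ∀ (x : Int), Dom_func x → Spec_func x (func x)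

-- ===== LEMMAS AND PROOFS =====

theorem digit_val (d : Nat) (h : d < 10) : digitInt (Nat.digitChar d) = (d : Int) := by
  interval_cases d <;> decide

theorem loop_step (m : Nat) (s : Int) :
    funcLoop (m : Int) s =
      if 0 < m then funcLoop (((m / 10 : Nat) : Int)) (s + ((m % 10 : Nat) : Int))
      else ((m : Int), s) := by
  rw [funcLoop]
  have h1 : PySem.Int.floordiv (m : Int) 10 = ((m / 10 : Nat) : Int) := by
    exact_mod_cast PySem.Int.floordiv_natCast m 10
  have h2 : PySem.Int.mod (m : Int) 10 = ((m % 10 : Nat) : Int) := by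
    exact_mod_cast PySem.Int.mod_natCast m 10
  rw [h1, h2]
  by_cases hm : 0 < m
  · rw [if_pos (by exact_mod_cast hm), if_pos hm]
  · rw [if_neg (by exact_mod_cast hm), if_neg hm]

theorem loop_shift (m : Nat) : ∀ (s : Int), (funcLoop (m : Int) s).2 = s + (funcLoop (m : Int) 0).2 := by
  induction m using Nat.strong_induction_on with
  | _ m ihm =>
    intro s
    by_cases hm : 0 < m
    · rw [loop_step m s, loop_step m 0, if_pos hm, if_pos hm,
          ihm (m / 10) (by omega) (s + ((m % 10 : Nat) : Int)),
          ihm (m / 10) (by omega) (0 + ((m % 10 : Nat) : Int))]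
      ring
    · rw [loop_step m s, loop_step m 0, if_neg hm, if_neg hm]
      simp

theorem map_sum_toDigits (n : Nat) :
    ((Nat.toDigits 10 n).map digitInt).sum = (funcLoop (n : Int) 0).2 := by
  induction n using Nat.strong_induction_on with
  | _ n ih =>
    rcases Nat.eq_zero_or_pos n with h0 | hpos
    · subst h0
      rw [loop_step]
      norm_num [Nat.toDigits_zero]
      decide
    · rw [loop_step, if_pos hpos, loop_shift (n / 10), ← ih (n / 10) (by omega)]
      by_cases hsmall : n < 10
      · rw [Nat.toDigits_of_lt_base hsmall]
        have h10 : n / 10 = 0 := by omega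
        have hmod : n % 10 = n := by omega
        rw [h10, hmod, Nat.toDigits_zero]
        simp [digit_val n hsmall]
        decide
      · rw [Nat.toDigits_of_base_le (by omega) (by omega)]
        simp [digit_val (n % 10) (by omega)]
        ring

-- ===== VERDICT (by name: the statement is the Claim_ definition above) =====
theorem func_spec : Claim_equal_func := by
  intro x _
  unfold Spec_func func func_alt
  by_cases hx : 0 < x
  · simp only [if_pos hx]
    have hcast : ((x.toNat : Nat) : Int) = x := Int.toNat_of_nonneg (by omega)
    have hchars : (PySem.Int.toStr x).toList = Nat.toDigits 10 x.toNat := by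
      rw [PySem.Int.toList_toStr, PySem.Int.toChars, if_neg (by omega)]
    rw [hchars, map_sum_toDigits, hcast, Int.add_comm]
  · rw [funcLoop, if_neg hx]
    simp [if_neg hx]
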